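-- pv_equiv track=rewrite | github.com/MiguelR90/katas | leetcode/easy-0219-contains-duplicates.py | contains_duplicates_v2
-- ===== SOURCE A (Python) =====
-- def contains_duplicates_v2(nums: list[int], k: int) -> bool:
--     left = 0
--     seen: set[int] = set()
--
--     for right in range(len(nums)):
--         while right - left > k:
--             seen.remove(nums[left])
--             left += 1
--
--         if nums[right] in seen:
--             return True
--
--         seen.add(nums[right])
--
--     return False
-- ===== SOURCE B (Python) =====
-- def contains_duplicates_v2(nums: list[int], k: int) -> bool:
--     last: dict[int, int] = {}
--     for i, v in enumerate(nums):
--         if v in last and i - last[v] <= k: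
--             return True
--         last[v] = i
--     return False
-- ===== Notes on version B (the rewrite author's own statement) =====
-- stated objective: idiomatic
-- what changed: Replaces A's two-pointer sliding-window set with its eviction while-loop by a single pass that stores each value's most recent index in a dict and decides membership by an index comparison i - last[v] <= k.
import Mathlib
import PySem

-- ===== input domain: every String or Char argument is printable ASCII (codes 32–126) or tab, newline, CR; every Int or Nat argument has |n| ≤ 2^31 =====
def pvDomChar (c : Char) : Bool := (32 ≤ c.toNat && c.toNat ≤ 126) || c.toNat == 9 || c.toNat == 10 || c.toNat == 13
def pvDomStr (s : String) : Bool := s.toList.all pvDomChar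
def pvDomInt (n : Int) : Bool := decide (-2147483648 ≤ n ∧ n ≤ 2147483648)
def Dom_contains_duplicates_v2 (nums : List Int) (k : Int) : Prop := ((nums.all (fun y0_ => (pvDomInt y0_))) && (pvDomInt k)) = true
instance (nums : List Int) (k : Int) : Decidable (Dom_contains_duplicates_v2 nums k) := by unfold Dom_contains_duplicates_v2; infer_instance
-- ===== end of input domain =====

-- B replaces A's sliding-window set (two pointers with an eviction while-loop) by a single
-- pass keeping each value's most recent index in a dict (objective: idiomatic).

-- ===== PORT A =====
-- A's inner 'while right - left > k' loop; fuel bounds the iterations (inside Pre_ the loop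
-- exits before fuel runs out; the 'none' branch is Python's KeyError path, excluded by Pre_)
def pvEvict (nums : List Int) (k : Int) (right : Nat) : Nat → Nat → PySem.Set Int → Nat × PySem.Set Int
  | 0, left, seen => (left, seen)
  | fuel + 1, left, seen =>
    if (right : Int) - left > k then
      match PySem.Set.remove? seen (nums.getD left 0) with
      | some seen' => pvEvict nums k right fuel (left + 1) seen'
      | none => (left, seen)
    else (left, seen)

-- A's 'for right in range(len(nums))' loop; fuel = remaining indices, nums.length at the call
def pvLoopA (nums : List Int) (k : Int) : Nat → Nat → Nat → PySem.Set Int → Bool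
  | 0, _, _, _ => false
  | fuel + 1, right, left, seen =>
    if right < nums.length then
      let p := pvEvict nums k right (right + 1 - left) left seen
      if PySem.Set.contains p.2 (nums.getD right 0) then true
      else pvLoopA nums k fuel (right + 1) p.1 (PySem.Set.add p.2 (nums.getD right 0))
    else false

def contains_duplicates_v2 (nums : List Int) (k : Int) : Bool :=
  pvLoopA nums k nums.length 0 0 PySem.Set.empty

-- ===== PORT B =====
-- B's 'for i, v in enumerate(nums)' loop; fuel = remaining indices, nums.length at the call
def pvLoopB (nums : List Int) (k : Int) : Nat → Nat → PySem.Dict Int Int → Bool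
  | 0, _, _ => false
  | fuel + 1, i, last =>
    if i < nums.length then
      let v := nums.getD i 0
      if last.contains v && decide ((i : Int) - last.getD v 0 ≤ k) then true
      else pvLoopB nums k fuel (i + 1) (last.insert v (i : Int))
    else false

def contains_duplicates_v2_alt (nums : List Int) (k : Int) : Bool :=
  pvLoopB nums k nums.length 0 PySem.Dict.empty

-- ===== PRECONDITION & SPEC =====
-- Pre_ excludes only inputs on which A raises: for k < 0 on a nonempty list the eviction
-- loop calls seen.remove on an empty set (KeyError).
def Pre_contains_duplicates_v2 (nums : List Int) (k : Int) : Prop := nums = [] ∨ 0 ≤ k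
instance (nums : List Int) (k : Int) : Decidable (Pre_contains_duplicates_v2 nums k) := by
  unfold Pre_contains_duplicates_v2; infer_instance

def pvWitness_contains_duplicates_v2 : List Int × Int := ([1, 2, 1], 2)

def Spec_contains_duplicates_v2 (nums : List Int) (k : Int) (out : Bool) : Prop :=
  out = contains_duplicates_v2_alt nums k
instance (nums : List Int) (k : Int) (out : Bool) : Decidable (Spec_contains_duplicates_v2 nums k out) := by
  unfold Spec_contains_duplicates_v2; infer_instance

-- ===== CLAIM (what is proved, stated in full; the proofs are below) =====
def Claim_equal_contains_duplicates_v2 : Prop := ∀ (nums : List Int) (k : Int), Dom_contains_duplicates_v2 nums k → Pre_contains_duplicates_v2 nums k → Spec_contains_duplicates_v2 nums k (contains_duplicates_v2 nums k)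


-- ===== LEMMAS AND PROOFS =====

-- reference loop: first index r with a duplicate at distance ≤ k before it
def pvHitB (nums : List Int) (k : Int) (r : Nat) : Bool :=
  (List.range r).any (fun j => decide ((r : Int) - j ≤ k) && (nums.getD j 0 == nums.getD r 0))

def pvRef (nums : List Int) (k : Int) : Nat → Nat → Bool
  | 0, _ => false
  | fuel + 1, i =>
    if i < nums.length then
      if pvHitB nums k i then true else pvRef nums k fuel (i + 1)
    else false

-- most recent index j < i with nums[j] = v
def pvLB (nums : List Int) (v : Int) : Nat → Option Nat
  | 0 => none
  | i + 1 => if nums.getD i 0 = v then some i else pvLB nums v i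

theorem pvLB_none {nums : List Int} {v : Int} {i : Nat} (h : pvLB nums v i = none) :
    ∀ j < i, nums.getD j 0 ≠ v := by
  induction i with
  | zero => omega
  | succ i ih =>
    simp only [pvLB] at h
    split at h
    · exact absurd h (by simp)
    · intro j hj
      rcases Nat.lt_succ_iff_lt_or_eq.1 hj with hj | hj
      · exact ih h j hj
      · subst hj; assumption

theorem pvLB_some {nums : List Int} {v : Int} {i j : Nat} (h : pvLB nums v i = some j) :
    j < i ∧ nums.getD j 0 = v ∧ ∀ j', j < j' → j' < i → nums.getD j' 0 ≠ v := by
  induction i with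
  | zero => simp [pvLB] at h
  | succ i ih =>
    simp only [pvLB] at h
    split at h
    · cases h
      refine ⟨Nat.lt_succ_self _, by assumption, ?_⟩
      intro j' h1 h2
      omega
    · obtain ⟨h1, h2, h3⟩ := ih h
      refine ⟨by omega, h2, ?_⟩
      intro j' hj1 hj2
      rcases Nat.lt_succ_iff_lt_or_eq.1 hj2 with hj2 | hj2
      · exact h3 j' hj1 hj2
      · subst hj2; assumption

theorem pvHitB_iff (nums : List Int) (k : Int) (r : Nat) :
    pvHitB nums k r = true ↔ ∃ j, j < r ∧ (r : Int) - j ≤ k ∧ nums.getD j 0 = nums.getD r 0 := by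
  simp only [pvHitB, List.any_eq_true, List.mem_range, Bool.and_eq_true, decide_eq_true_eq, beq_iff_eq]

-- hit in terms of the most recent previous occurrence
theorem pvHitB_eq_LB (nums : List Int) (k : Int) (r : Nat) :
    pvHitB nums k r = match pvLB nums (nums.getD r 0) r with
      | none => false
      | some j => decide ((r : Int) - j ≤ k) := by
  cases hlb : pvLB nums (nums.getD r 0) r with
  | none =>
    simp only
    rw [Bool.eq_false_iff]
    intro hh
    obtain ⟨j, h1, _, h3⟩ := (pvHitB_iff nums k r).1 hh
    exact pvLB_none hlb j h1 h3
  | some j0 =>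
    obtain ⟨h1, h2, h3⟩ := pvLB_some hlb
    simp only
    by_cases hk : (r : Int) - j0 ≤ k
    · simp only [hk, decide_true]
      exact (pvHitB_iff nums k r).2 ⟨j0, h1, hk, h2⟩
    · simp only [hk, decide_false]
      rw [Bool.eq_false_iff]
      intro hh
      obtain ⟨j, hj1, hj2, hj3⟩ := (pvHitB_iff nums k r).1 hh
      have hle : j ≤ j0 := by
        by_contra hgt
        exact h3 j (by omega) hj1 hj3
      omega

-- ===== B side =====
theorem pvLoopB_eq_ref (nums : List Int) (k : Int) :
    ∀ fuel i last,
      (∀ v, PySem.Dict.get? last v = (pvLB nums v i).map (fun j => (j : Int))) →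
      pvLoopB nums k fuel i last = pvRef nums k fuel i := by
  intro fuel
  induction fuel with
  | zero => intro i last _; rfl
  | succ n ih =>
    intro i last hinv
    rw [pvLoopB, pvRef]
    by_cases hi : i < nums.length
    · simp only [if_pos hi]
      have hc : PySem.Dict.contains last (nums.getD i 0) = (PySem.Dict.get? last (nums.getD i 0)).isSome :=
        PySem.Dict.contains_eq_isSome_get? _ _
      have hinv' : ∀ v, PySem.Dict.get? (last.insert (nums.getD i 0) (i : Int)) v
          = (pvLB nums v (i + 1)).map (fun j => (j : Int)) := by
        intro v
        by_cases hv : v = nums.getD i 0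
        · subst hv
          rw [PySem.Dict.get?_insert_self]
          simp [pvLB]
        · rw [PySem.Dict.get?_insert_of_ne _ _ hv]
          rw [hinv v]
          simp only [pvLB]
          rw [if_neg (fun h => hv h.symm)]
      cases hlb : pvLB nums (nums.getD i 0) i with
      | none =>
        have : PySem.Dict.contains last (nums.getD i 0) = false := by
          rw [hc, hinv, hlb]; rfl
        rw [this]
        simp only [Bool.false_and, if_neg (by simp : ¬ (false = true))]
        rw [pvHitB_eq_LB, hlb]
        simp only [if_neg (by simp : ¬ (false = true))]
        exact ih (i + 1) _ hinv'
      | some j0 =>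
        have hg : PySem.Dict.get? last (nums.getD i 0) = some ((j0 : Int)) := by
          rw [hinv, hlb]; rfl
        have : PySem.Dict.contains last (nums.getD i 0) = true := by rw [hc, hg]; rfl
        rw [this, PySem.Dict.getD_eq_get?_getD, hg]
        simp only [Bool.true_and, Option.getD_some]
        rw [pvHitB_eq_LB, hlb]
        simp only
        by_cases hk : (i : Int) - j0 ≤ k
        · simp [hk]
        · simp only [hk, decide_false, if_neg (by simp : ¬ (false = true))]
          exact ih (i + 1) _ hinv'
    · simp only [if_neg hi]

-- ===== A side =====
-- invariants of A's loop state
def pvInvA (nums : List Int) (k : Int) (right left : Nat) (seen : PySem.Set Int) : Prop :=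
  ((left : Int) ≤ (right : Int) - k ∨ left = 0) ∧
  (∀ v, v ∈ seen ↔ ∃ j, left ≤ j ∧ j < right ∧ nums.getD j 0 = v) ∧
  (∀ j1 j2, left ≤ j1 → j1 < j2 → j2 < right → nums.getD j1 0 ≠ nums.getD j2 0) ∧
  seen.Nodup

theorem pvEvict_spec (nums : List Int) (k : Int) (hk : 0 ≤ k) (right : Nat) :
    ∀ fuel left seen, pvInvA nums k right left seen →
      ((right : Int) - k - left).toNat ≤ fuel →
      (pvEvict nums k right fuel left seen).1 = ((right : Int) - k).toNat ∧
      pvInvA nums k right ((right : Int) - k).toNat (pvEvict nums k right fuel left seen).2 := by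
  intro fuel
  induction fuel with
  | zero =>
    intro left seen hinv hf
    obtain ⟨h1, h2, h3, h4⟩ := hinv
    have hL : left = ((right : Int) - k).toNat := by omega
    rw [pvEvict]
    refine ⟨by simpa using hL, ?_⟩
    rw [← hL]
    exact ⟨h1, h2, h3, h4⟩
  | succ n ih =>
    intro left seen hinv hf
    obtain ⟨h1, h2, h3, h4⟩ := hinv
    rw [pvEvict]
    by_cases hc : (right : Int) - left > k
    · have hlr : left < right := by omega
      have hmem : nums.getD left 0 ∈ seen := (h2 _).2 ⟨left, le_refl _, hlr, rfl⟩
      have hrem := PySem.Set.remove?_of_mem (s := seen) (x := nums.getD left 0) hmem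
      simp only [if_pos hc, hrem]
      have hinv' : pvInvA nums k right (left + 1) (PySem.Set.discard seen (nums.getD left 0)) := by
        refine ⟨by omega, ?_, ?_, PySem.Set.nodup_discard _ _ h4⟩
        · intro v
          rw [PySem.Set.mem_discard]
          constructor
          · rintro ⟨hv, hne⟩
            obtain ⟨j, hj1, hj2, hj3⟩ := (h2 v).1 hv
            refine ⟨j, ?_, hj2, hj3⟩
            rcases Nat.eq_or_lt_of_le hj1 with hj | hj
            · exact absurd (hj ▸ hj3).symm hne
            · omega
          · rintro ⟨j, hj1, hj2, hj3⟩
            refine ⟨(h2 v).2 ⟨j, by omega, hj2, hj3⟩, ?_⟩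
            intro he
            exact h3 left j (le_refl _) (by omega) hj2 (he.symm.trans hj3.symm)
        · intro j1 j2 hj1 hj2 hj3
          exact h3 j1 j2 (by omega) hj2 hj3
      exact ih (left + 1) _ hinv' (by omega)
    · simp only [if_neg hc]
      have hL : left = ((right : Int) - k).toNat := by omega
      refine ⟨by simpa using hL, ?_⟩
      rw [← hL]
      exact ⟨h1, h2, h3, h4⟩

theorem pvLoopA_eq_ref (nums : List Int) (k : Int) (hk : 0 ≤ k) :
    ∀ fuel right left seen,
      pvInvA nums k right left seen →
      pvLoopA nums k fuel right left seen = pvRef nums k fuel right := by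
  intro fuel
  induction fuel with
  | zero => intro right left seen _; rfl
  | succ n ih =>
    intro right left seen hinv
    rw [pvLoopA, pvRef]
    by_cases hi : right < nums.length
    · simp only [if_pos hi]
      have hfuel : ((right : Int) - k - left).toNat ≤ right + 1 - left := by
        obtain ⟨h1, _⟩ := hinv
        omega
      obtain ⟨hfst, hinv'⟩ := pvEvict_spec nums k hk right (right + 1 - left) left seen hinv hfuel
      set L := ((right : Int) - k).toNat with hLdef
      set seen' := (pvEvict nums k right (right + 1 - left) left seen).2 with hs'
      obtain ⟨i1, i2, i3, i4⟩ := hinv'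
      have hmemiff : PySem.Set.contains seen' (nums.getD right 0) = pvHitB nums k right := by
        by_cases hm : nums.getD right 0 ∈ seen'
        · rw [(PySem.Set.contains_iff _ _).2 hm]
          obtain ⟨j, hj1, hj2, hj3⟩ := (i2 _).1 hm
          exact ((pvHitB_iff nums k right).2 ⟨j, hj2, by omega, hj3⟩).symm
        · have h0 : PySem.Set.contains seen' (nums.getD right 0) = false := by
            rw [Bool.eq_false_iff]; intro hcc; exact hm ((PySem.Set.contains_iff _ _).1 hcc)
          rw [h0]
          symm; rw [Bool.eq_false_iff]; intro hh
          obtain ⟨j, hj1, hj2, hj3⟩ := (pvHitB_iff nums k right).1 hh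
          exact hm ((i2 _).2 ⟨j, by omega, hj1, hj3⟩)
      rw [hmemiff]
      by_cases hh : pvHitB nums k right = true
      · simp [hh]
      · rw [Bool.not_eq_true] at hh
        simp only [hh, if_neg (by simp : ¬ (false = true))]
        rw [hfst]
        have hnotmem : nums.getD right 0 ∉ seen' := by
          intro hm
          obtain ⟨j, hj1, hj2, hj3⟩ := (i2 _).1 hm
          exact absurd ((pvHitB_iff nums k right).2 ⟨j, hj2, by omega, hj3⟩) (by rw [hh]; simp)
        have hinv'' : pvInvA nums k (right + 1) L (PySem.Set.add seen' (nums.getD right 0)) := by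
          refine ⟨by omega, ?_, ?_, PySem.Set.nodup_add _ _ i4⟩
          · intro v
            rw [PySem.Set.mem_add]
            constructor
            · rintro (hv | hv)
              · obtain ⟨j, hj1, hj2, hj3⟩ := (i2 v).1 hv
                exact ⟨j, hj1, by omega, hj3⟩
              · exact ⟨right, by omega, by omega, hv.symm⟩
            · rintro ⟨j, hj1, hj2, hj3⟩
              by_cases hj : j = right
              · subst hj; exact Or.inr hj3.symm
              · exact Or.inl ((i2 v).2 ⟨j, hj1, by omega, hj3⟩)
          · intro j1 j2 hj1 hj2 hj3
            by_cases hj : j2 = right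
            · subst hj
              intro he
              exact hnotmem ((i2 _).2 ⟨j1, hj1, hj2, he⟩)
            · exact i3 j1 j2 hj1 hj2 (by omega)
        exact ih (right + 1) L _ hinv''
    · simp only [if_neg hi]

-- ===== VERDICT (by name: the statement is the Claim_ definition above) =====
theorem contains_duplicates_v2_spec : Claim_equal_contains_duplicates_v2 := by
  unfold Claim_equal_contains_duplicates_v2
  intro nums k _ hpre
  unfold Spec_contains_duplicates_v2
  rcases hpre with hnil | hk
  · subst hnil; rfl
  · rw [contains_duplicates_v2, contains_duplicates_v2_alt]
    have hA := pvLoopA_eq_ref nums k hk nums.length 0 0 PySem.Set.empty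
      ⟨Or.inr rfl, by simp [PySem.Set.empty], by omega, List.nodup_nil⟩
    have hB := pvLoopB_eq_ref nums k nums.length 0 PySem.Dict.empty
      (by intro v; simp [PySem.Dict.get?_empty, pvLB])
    rw [hA, hB]
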